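-- pv_equiv track=rewrite | github.com/Zenysis/Harmony | platform/config/utils.py | move_indicators_among_groups
-- ===== SOURCE A (Python) =====
-- def move_indicators_among_groups(
--     groups_from: list, groups_to: list, group_ids: list
-- ) -> tuple:
--     '''This method moves indicators from one group to another. This is especially important if one
--     wants calculated indicators to appear in the same group as its component indicators.
--
--     groups_from: List(dict): Group from which to move indicator groups
--     groups_to: List(dict): To which to add indicator groups
--     group_ids: List(str): Group ids that should be moved from groups_from to groups_to
--     returns: Tuple(List(dict)) -> Modified groups_from and groups_to
--     '''
--     for index in sorted(range(len(groups_from)), reverse=True):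
--         _group = groups_from[index]
--         if _group.get("groupId") in group_ids:
--             groups_to.append(groups_from.pop(index))
--     return groups_from, groups_to
-- ===== SOURCE B (Python) =====
-- def move_indicators_among_groups(
--     groups_from: list, groups_to: list, group_ids: list
-- ) -> tuple:
--     """Partition-and-rebuild instead of the reverse in-place pop loop.
--
--     Same observable mutation as the original: groups_from keeps the same list
--     object (slice assignment) and groups_to is extended in place; moved groups
--     are appended in reverse of their original order, matching the descending-
--     index pop order of the original.
--     """
--     ids = set(group_ids)
--     moved = [g for g in groups_from if g.get("groupId") in ids]
--     kept = [g for g in groups_from if g.get("groupId") not in ids]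
--     groups_from[:] = kept
--     groups_to.extend(reversed(moved))
--     return groups_from, groups_to
-- ===== Notes on version B (the rewrite author's own statement) =====
-- stated objective: faster
-- what changed: Replaces the descending-index in-place pop loop with a single forward partition into moved/kept comprehensions against a set of the ids, then slice-assigns kept back and extends groups_to with reversed(moved).
import Mathlib
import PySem

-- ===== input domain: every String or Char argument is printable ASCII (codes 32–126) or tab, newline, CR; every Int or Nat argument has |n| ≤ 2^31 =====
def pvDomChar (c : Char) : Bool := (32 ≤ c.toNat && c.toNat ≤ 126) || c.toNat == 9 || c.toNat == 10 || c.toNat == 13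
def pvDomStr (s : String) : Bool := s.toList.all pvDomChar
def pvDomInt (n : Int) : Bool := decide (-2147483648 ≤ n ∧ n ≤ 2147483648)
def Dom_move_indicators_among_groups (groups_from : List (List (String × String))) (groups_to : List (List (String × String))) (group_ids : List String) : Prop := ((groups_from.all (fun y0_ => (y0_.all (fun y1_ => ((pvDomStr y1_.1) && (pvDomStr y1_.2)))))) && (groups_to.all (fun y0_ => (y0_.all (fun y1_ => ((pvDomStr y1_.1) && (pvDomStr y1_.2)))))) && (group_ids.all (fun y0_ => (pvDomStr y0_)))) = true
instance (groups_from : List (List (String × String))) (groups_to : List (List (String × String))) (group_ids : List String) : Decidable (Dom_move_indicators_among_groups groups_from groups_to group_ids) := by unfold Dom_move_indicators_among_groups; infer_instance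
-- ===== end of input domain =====

-- B replaces A's descending-index in-place pop loop with a forward partition into moved/kept
-- against a set of the ids and a rebuild (faster: no quadratic pops, hashed membership); the
-- equivalence proved is about the RETURN value (both Pythons also mutate groups_from/groups_to
-- in place, with the same observable effect).

-- ===== PORT A =====
-- `_group.get("groupId") in group_ids` : dict is an assoc list, .get = first match;
-- `None in group_ids` is False since group_ids holds strings.
def pvHit (group_ids : List String) (g : List (String × String)) : Bool :=
  match g.find? (fun p => p.1 == "groupId") with
  | some p => group_ids.contains p.2
  | none => false

-- one iteration of A's for-loop body at index i (the `none` branches are unreachable in A's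
-- loop, whose indices come from range(len(groups_from)) descending)
def miagStep (group_ids : List String)
    (st : (List (List (String × String))) × (List (List (String × String)))) (i : Int) :
    (List (List (String × String))) × (List (List (String × String))) :=
  match PySem.List.pyGet? st.1 i with
  | none => st
  | some _group =>
    if pvHit group_ids _group then
      match PySem.List.pop? st.1 i with
      | some (e, gf') => (gf', st.2 ++ [e])
      | none => st
    else st

def move_indicators_among_groups (groups_from : List (List (String × String))) (groups_to : List (List (String × String))) (group_ids : List String) : (List (List (String × String))) × (List (List (String × String))) :=
  (PySem.List.sorted (PySem.List.pyRange 0 (groups_from.length : Int) 1) (fun i => i) true).foldl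
    (miagStep group_ids) (groups_from, groups_to)

-- ===== PORT B =====
-- B's membership test `g.get("groupId") in ids` against the set built from group_ids
def pvAltHit (ids : PySem.Set String) (g : List (String × String)) : Bool :=
  match g.find? (fun p => p.1 == "groupId") with
  | some p => PySem.Set.contains ids p.2
  | none => false

def move_indicators_among_groups_alt (groups_from : List (List (String × String))) (groups_to : List (List (String × String))) (group_ids : List String) : (List (List (String × String))) × (List (List (String × String))) :=
  let ids := PySem.Set.ofList group_ids
  let moved := groups_from.filter (fun g => pvAltHit ids g)
  let kept := groups_from.filter (fun g => !pvAltHit ids g)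
  (kept, groups_to ++ moved.reverse)

-- ===== PRECONDITION & SPEC =====
def Spec_move_indicators_among_groups (groups_from : List (List (String × String))) (groups_to : List (List (String × String))) (group_ids : List String) (out : (List (List (String × String))) × (List (List (String × String)))) : Prop := out = move_indicators_among_groups_alt groups_from groups_to group_ids
instance (groups_from : List (List (String × String))) (groups_to : List (List (String × String))) (group_ids : List String) (out : (List (List (String × String))) × (List (List (String × String)))) : Decidable (Spec_move_indicators_among_groups groups_from groups_to group_ids out) := by unfold Spec_move_indicators_among_groups; infer_instance

-- ===== CLAIM (what is proved, stated in full; the proofs are below) =====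
def Claim_equal_move_indicators_among_groups : Prop := ∀ (groups_from : List (List (String × String))) (groups_to : List (List (String × String))) (group_ids : List String), Dom_move_indicators_among_groups groups_from groups_to group_ids → Spec_move_indicators_among_groups groups_from groups_to group_ids (move_indicators_among_groups groups_from groups_to group_ids)

-- ===== LEMMAS AND PROOFS =====

-- A's index list sorted(range(n), reverse=True) is just range(n) reversed
theorem miag_sorted_rev (n : Nat) :
    PySem.List.sorted (PySem.List.pyRange 0 (n : Int) 1) (fun i => i) true
      = (PySem.List.pyRange 0 (n : Int) 1).reverse := by
  apply PySem.List.sorted_rev_eq_of_perm_of_pairwise_gt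
  · exact (PySem.List.pyRange 0 (n : Int) 1).reverse_perm
  · simpa [List.pairwise_reverse] using
      PySem.List.pairwise_lt_pyRange_one (a := 0) (b := (n : Int))

-- step commutes with cons for a shifted positive index
theorem miag_step_shift (group_ids : List String) (i : Int) (hi : 0 ≤ i)
    (x : List (String × String)) (xs gt : List (List (String × String))) :
    miagStep group_ids (x :: xs, gt) (i + 1)
      = (x :: (miagStep group_ids (xs, gt) i).1, (miagStep group_ids (xs, gt) i).2) := by
  unfold miagStep
  have h1 : PySem.List.pyGet? (x :: xs) (i + 1) = PySem.List.pyGet? xs i := by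
    rw [PySem.List.pyGet?_of_nonneg (h := hi), PySem.List.pyGet?_of_nonneg (h := show (0:Int) ≤ i + 1 by omega)]
    have h2 : (i + 1).toNat = i.toNat + 1 := by omega
    simp [h2]
  simp only [h1]
  cases hg : PySem.List.pyGet? xs i with
  | none => simp
  | some g =>
    simp only []
    by_cases hh : pvHit group_ids g
    · have hin : i.toNat < xs.length := by
        rw [PySem.List.pyGet?_of_nonneg (h := hi)] at hg
        obtain ⟨h, -⟩ := List.getElem?_eq_some_iff.mp hg
        exact h
      have e1 : PySem.List.pop? xs i = some (xs[i.toNat], xs.eraseIdx i.toNat) := by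
        have := PySem.List.pop?_natCast (xs := xs) (n := i.toNat) hin
        simpa [Int.toNat_of_nonneg hi] using this
      have e2 : PySem.List.pop? (x :: xs) (i + 1)
          = some (xs[i.toNat], x :: xs.eraseIdx i.toNat) := by
        have := PySem.List.pop?_natCast (xs := x :: xs) (n := i.toNat + 1) (by simpa using hin)
        have hc : ((i.toNat + 1 : Nat) : Int) = i + 1 := by omega
        rw [hc] at this
        simpa [List.eraseIdx_cons_succ] using this
      simp [hh, e1, e2]
    · simp [hh]

theorem miag_fold_shift (group_ids : List String) (l : List Int) (hl : ∀ i ∈ l, 0 ≤ i) :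
    ∀ (x : List (String × String)) (xs gt : List (List (String × String))),
      (l.map (fun i => i + 1)).foldl (miagStep group_ids) (x :: xs, gt)
        = (x :: (l.foldl (miagStep group_ids) (xs, gt)).1, (l.foldl (miagStep group_ids) (xs, gt)).2) := by
  induction l with
  | nil => intro x xs gt; simp
  | cons i t ih =>
    intro x xs gt
    have hi : 0 ≤ i := hl i (by simp)
    simp only [List.map_cons, List.foldl_cons,
      miag_step_shift group_ids i hi x xs gt]
    exact ih (fun j hj => hl j (by simp [hj])) x _ _

theorem miag_idxs_succ (n : Nat) :
    (PySem.List.pyRange 0 ((n + 1 : Nat) : Int) 1).reverse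
      = ((PySem.List.pyRange 0 (n : Int) 1).reverse.map (fun i => i + 1)) ++ [0] := by
  have h : PySem.List.pyRange 0 ((n + 1 : Nat) : Int) 1
      = PySem.List.pyRange 0 1 1 ++ PySem.List.pyRange 1 ((n + 1 : Nat) : Int) 1 :=
    PySem.List.pyRange_one_append 0 1 _ (by omega) (by omega)
  have h2 : PySem.List.pyRange 1 ((n + 1 : Nat) : Int) 1
      = (PySem.List.pyRange 0 (n : Int) 1).map (fun i => i + 1) := by
    rw [PySem.List.pyRange_one, PySem.List.pyRange_one]
    have : ((n:Int) + 1 - 1).toNat = ((n:Int) - 0).toNat := by omega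
    push_cast
    rw [this]
    rw [List.map_map]
    apply List.map_congr_left
    intro a _
    simp [Function.comp]
    ring
  rw [h, h2]
  have h0 : PySem.List.pyRange 0 1 1 = [0] := by decide
  simp [h0, List.map_reverse]

theorem miag_main (group_ids : List String) :
    ∀ (gf gt : List (List (String × String))),
      ((PySem.List.pyRange 0 (gf.length : Int) 1).reverse).foldl (miagStep group_ids) (gf, gt)
        = (gf.filter (fun g => !pvHit group_ids g),
           gt ++ (gf.filter (fun g => pvHit group_ids g)).reverse) := by
  intro gf
  induction gf with
  | nil => intro gt; simp
  | cons x xs ih =>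
    intro gt
    have hnn : ∀ i ∈ (PySem.List.pyRange 0 (xs.length : Int) 1).reverse, 0 ≤ i := by
      intro i hi
      rw [List.mem_reverse, PySem.List.mem_pyRange_one] at hi
      omega
    rw [List.length_cons, miag_idxs_succ, List.foldl_append,
      miag_fold_shift group_ids _ hnn x xs gt, ih gt]
    simp only [List.foldl_cons, List.foldl_nil]
    by_cases hh : pvHit group_ids x
    · simp [miagStep, PySem.List.pyGet?_zero_cons, hh, PySem.List.pop?_zero_cons,
        List.filter_cons]
    · simp [miagStep, PySem.List.pyGet?_zero_cons, hh, List.filter_cons]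

-- the set membership of B equals the list membership of A
theorem pvAltHit_eq (group_ids : List String) (g : List (String × String)) :
    pvAltHit (PySem.Set.ofList group_ids) g = pvHit group_ids g := by
  unfold pvAltHit pvHit
  cases g.find? (fun p => p.1 == "groupId") with
  | none => rfl
  | some p =>
    simp only []
    by_cases h : p.2 ∈ group_ids
    · simp [PySem.Set.contains_iff, PySem.Set.mem_ofList, h, List.contains_iff_mem]
    · simp [h, List.contains_iff_mem]

-- ===== VERDICT (by name: the statement is the Claim_ definition above) =====
theorem move_indicators_among_groups_spec : Claim_equal_move_indicators_among_groups := by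
  intro gf gt ids _
  unfold Spec_move_indicators_among_groups move_indicators_among_groups move_indicators_among_groups_alt
  rw [miag_sorted_rev, miag_main]
  simp only [List.filter_congr (fun g _ => pvAltHit_eq ids g),
    List.filter_congr (fun g _ => congrArg Bool.not (pvAltHit_eq ids g))]
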